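-- pv_equiv track=rewrite | github.com/marjanstoimchev/HELM | data/hierarchy.py | encode_classes_and_ancestors
-- ===== SOURCE A (Python) =====
-- def encode_classes_and_ancestors(leaf_paths, intermediate_paths):
--     """
--     Encodes leaf classes and their ancestors into integer representations.
--
--     Args:
--         leaf_paths (dict): A dictionary mapping class names to their string codes.
--         intermediate_paths (dict): A dictionary mapping ancestor names to their string codes.
--
--     Returns:
--         dict: A dictionary where keys are encoded class indices (integers) and values are lists of
--         encoded ancestor indices (integers).
--     """
--     class_encoding = {class_code: idx for idx, class_code in enumerate(leaf_paths.values())}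
--
--     ancestor_encoding_start = len(leaf_paths)
--     ancestor_encoding = {ancestor_code: idx + ancestor_encoding_start
--                          for idx, ancestor_code in enumerate(intermediate_paths.values())}
--
--     def get_ancestor_codes(class_code):
--         return [ancestor_encoding[ancestor_code]
--                 for ancestor_code in intermediate_paths.values()
--                 if class_code.startswith(ancestor_code)]
--
--     return {class_encoding[class_code]: get_ancestor_codes(class_code)
--             for class_code in leaf_paths.values()}
-- ===== SOURCE B (Python) =====
-- def encode_classes_and_ancestors(leaf_paths, intermediate_paths):
--     leaf_codes = list(leaf_paths.values())
--     inter_codes = list(intermediate_paths.values())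
--     n = len(leaf_paths)
--     class_encoding = {code: idx for idx, code in enumerate(leaf_codes)}
--     ancestor_encoding = {code: idx + n for idx, code in enumerate(inter_codes)}
--     occ = {}
--     for idx, code in enumerate(inter_codes):
--         occ.setdefault(code, []).append(idx)
--
--     def ancestors_of(code):
--         pos = []
--         for k in range(len(code) + 1):
--             prefix = code[:k]
--             if prefix in occ:
--                 pos.extend(occ[prefix])
--         pos.sort()
--         return [ancestor_encoding[inter_codes[i]] for i in pos]
--
--     return {class_encoding[code]: ancestors_of(code) for code in leaf_codes}
-- ===== Notes on version B (the rewrite author's own statement) =====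
-- stated objective: faster
-- what changed: Replaces A's per-class scan over all intermediate codes with a positions-per-code dict: each class enumerates its own prefixes, looks them up, sorts the matching positions and maps them to encoded indices.
import Mathlib
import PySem

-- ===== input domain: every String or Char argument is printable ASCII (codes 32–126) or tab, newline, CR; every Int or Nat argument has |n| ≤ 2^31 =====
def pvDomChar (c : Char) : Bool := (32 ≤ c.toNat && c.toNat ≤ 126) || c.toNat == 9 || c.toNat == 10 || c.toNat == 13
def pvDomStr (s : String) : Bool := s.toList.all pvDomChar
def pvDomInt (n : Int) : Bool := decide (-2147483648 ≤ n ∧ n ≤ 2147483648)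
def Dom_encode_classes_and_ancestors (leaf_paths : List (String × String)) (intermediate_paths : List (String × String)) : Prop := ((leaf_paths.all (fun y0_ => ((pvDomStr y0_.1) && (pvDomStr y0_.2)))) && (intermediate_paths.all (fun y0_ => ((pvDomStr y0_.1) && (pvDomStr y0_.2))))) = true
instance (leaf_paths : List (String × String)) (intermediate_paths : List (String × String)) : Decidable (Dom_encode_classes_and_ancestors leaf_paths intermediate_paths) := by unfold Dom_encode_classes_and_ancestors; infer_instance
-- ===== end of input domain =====

-- B replaces A's per-class scan over ALL intermediate codes by a positions-per-code dict:
-- each class looks up only its own prefixes and sorts the matching positions; objective: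
-- faster (asymptotic in the number of intermediate codes).

-- ===== PORT A =====
-- shared scaffolding both Pythons build identically: the two enumeration dicts and the
-- result dict {class_encoding[code]: f(code) for code in leaf_codes}
def pvClassEnc (vs : List String) : PySem.Dict String Int :=
  (PySem.List.enumerate vs 0).foldl (fun d p => d.insert p.2 p.1) PySem.Dict.empty

def pvAncEnc (vs : List String) (s : Int) : PySem.Dict String Int :=
  (PySem.List.enumerate vs 0).foldl (fun d p => d.insert p.2 (p.1 + s)) PySem.Dict.empty

def pvBuild (codes : List String) (ce : PySem.Dict String Int) (f : String → List Int) : List (Int × List Int) :=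
  (codes.foldl (fun d c => d.insert (ce.getD c 0) (f c)) PySem.Dict.empty).items

-- Python's ancestor_encoding[a] / class_encoding[c] are ported as getD _ 0: the key is
-- always present (the dicts are built from exactly the values being looked up), so the
-- default is never returned and no KeyError is reachable.
def encode_classes_and_ancestors (leaf_paths : List (String × String)) (intermediate_paths : List (String × String)) : List (Int × List Int) :=
  let leaf_codes := (PySem.Dict.ofList leaf_paths).values
  let inter_codes := (PySem.Dict.ofList intermediate_paths).values
  let start : Int := ((PySem.Dict.ofList leaf_paths).size : Int)
  pvBuild leaf_codes (pvClassEnc leaf_codes)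
    (fun class_code =>
      (inter_codes.filter (fun a => PySem.Str.startswith class_code a)).map
        (fun a => (pvAncEnc inter_codes start).getD a 0))

-- ===== PORT B =====
-- occ[code] = list of positions of code in inter_codes (setdefault+append = modify _ [] (· ++ [idx]));
-- Python's occ[prefix] (guarded by 'prefix in occ') and inter_codes[i] (i a stored valid
-- position) are ported with the defaults [] / "" which are never returned.
def encode_classes_and_ancestors_alt (leaf_paths : List (String × String)) (intermediate_paths : List (String × String)) : List (Int × List Int) :=
  let leaf_codes := (PySem.Dict.ofList leaf_paths).values
  let inter_codes := (PySem.Dict.ofList intermediate_paths).values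
  let n : Int := ((PySem.Dict.ofList leaf_paths).size : Int)
  let occ : PySem.Dict String (List Int) :=
    (PySem.List.enumerate inter_codes 0).foldl
      (fun d p => d.modify p.2 [] (fun l => l ++ [p.1])) PySem.Dict.empty
  pvBuild leaf_codes (pvClassEnc leaf_codes)
    (fun code =>
      let pos := (PySem.List.pyRange 0 (PySem.Str.len code + 1)).foldl
        (fun acc k =>
          if occ.contains (PySem.Str.slice code none (some k))
          then acc ++ occ.getD (PySem.Str.slice code none (some k)) []
          else acc) []
      (PySem.List.sorted pos (fun x => x)).map
        (fun i => (pvAncEnc inter_codes n).getD (PySem.List.pyGetD inter_codes i "") 0))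

-- ===== PRECONDITION & SPEC =====
-- (A never raises: both dict lookups hit keys the same comprehension just created, so no Pre_.)
def Spec_encode_classes_and_ancestors (leaf_paths : List (String × String)) (intermediate_paths : List (String × String)) (out : List (Int × List Int)) : Prop := out = encode_classes_and_ancestors_alt leaf_paths intermediate_paths
instance (leaf_paths : List (String × String)) (intermediate_paths : List (String × String)) (out : List (Int × List Int)) : Decidable (Spec_encode_classes_and_ancestors leaf_paths intermediate_paths out) := by unfold Spec_encode_classes_and_ancestors; infer_instance

-- ===== CLAIM (what is proved, stated in full; the proofs are below) =====
def Claim_equal_encode_classes_and_ancestors : Prop := ∀ (leaf_paths : List (String × String)) (intermediate_paths : List (String × String)), Dom_encode_classes_and_ancestors leaf_paths intermediate_paths → Spec_encode_classes_and_ancestors leaf_paths intermediate_paths (encode_classes_and_ancestors leaf_paths intermediate_paths)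

-- ===== LEMMAS AND PROOFS =====

-- the occurrence dict, characterised
def pvOcc (vs : List String) : PySem.Dict String (List Int) :=
  (PySem.List.enumerate vs 0).foldl
    (fun d p => d.modify p.2 [] (fun l => l ++ [p.1])) PySem.Dict.empty

theorem pv_occ_getD (vs : List String) (a : String) :
    (pvOcc vs).getD a [] =
      ((PySem.List.enumerate vs 0).filter (fun p => p.2 == a)).map (fun p => p.1) := by
  unfold pvOcc
  have h : (PySem.List.enumerate vs 0).foldl
      (fun d p => d.modify p.2 [] (fun l => l ++ [p.1])) PySem.Dict.empty =
    ((PySem.List.enumerate vs 0).map (fun p => (p.2, p.1))).foldl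
      (fun d q => d.modify q.1 [] (fun l => l ++ [q.2])) PySem.Dict.empty := by
    rw [List.foldl_map]
  rw [h, PySem.Dict.getD_foldl_modify_append]
  rw [List.filter_map, List.map_map]
  simp
  rfl

theorem pv_occ_contains (vs : List String) (a : String) :
    (pvOcc vs).contains a = true ↔ a ∈ vs := by
  rw [PySem.Dict.contains_iff_mem_keys]
  unfold pvOcc
  rw [PySem.Dict.keys_foldl_modify_key (PySem.List.enumerate vs 0) (fun p => p.2) []
      (fun _ p => fun l => l ++ [p.1]) PySem.Dict.empty]
  rw [PySem.Dict.keys_empty, PySem.List.map_snd_enumerate]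
  have : PySem.Set.update ([] : PySem.Set String) vs = PySem.Set.ofList vs := by
    simp [PySem.Set.update, PySem.Set.ofList]
  rw [this, PySem.Set.mem_ofList]

theorem pv_mem_occ (vs : List String) (a : String) (i : Int) :
    i ∈ (pvOcc vs).getD a [] ↔
      ∃ (j : Nat), ∃ (_ : j < vs.length), vs[j] = a ∧ i = (0 : Int) + (j : Int) := by
  rw [pv_occ_getD]
  constructor
  · intro h
    obtain ⟨p, hp, hpx⟩ := List.mem_map.mp h
    have hp' := List.mem_filter.mp hp
    obtain ⟨j, hj, rfl⟩ := (PySem.List.mem_enumerate_iff vs 0 p).mp hp'.1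
    exact ⟨j, hj, by simpa using hp'.2, hpx.symm⟩
  · rintro ⟨j, hj, ha, rfl⟩
    apply List.mem_map.mpr
    refine ⟨((0 : Int) + (j : Int), vs[j]), List.mem_filter.mpr ⟨?_, by simpa using ha⟩, rfl⟩
    exact (PySem.List.mem_enumerate_iff vs 0 _).mpr ⟨j, hj, rfl⟩

theorem pv_nodup_occ (vs : List String) (a : String) :
    ((pvOcc vs).getD a []).Nodup := by
  rw [pv_occ_getD]
  have hpw : (((PySem.List.enumerate vs 0).filter (fun p => p.2 == a)).map
      (fun p => p.1)).Pairwise (fun x y => x < y) := by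
    apply List.pairwise_map.mpr
    exact (PySem.List.pairwise_lt_enumerate vs 0).filter _
  exact hpw.imp (fun h => ne_of_lt h)

theorem pv_slice_toList (c : String) (k : Int) (hk : 0 ≤ k) :
    (PySem.Str.slice c none (some k)).toList = c.toList.take k.toNat := by
  simp [PySem.Str.slice, PySem.List.slice_to _ hk]

-- the slice of c at the length of a prefix a recovers a
theorem pv_slice_eq (c a : String) (hpref : a.toList <+: c.toList) :
    PySem.Str.slice c none (some (a.toList.length : Int)) = a := by
  apply String.toList_inj.mp
  rw [pv_slice_toList c _ (by positivity), Int.toNat_natCast]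
  exact (List.prefix_iff_eq_take.mp hpref).symm

-- the inner functions agree: A's filtered scan equals B's sorted prefix-position lookups
theorem pv_inner_eq (vs : List String) (s : Int) (c : String) :
    (vs.filter (fun a => PySem.Str.startswith c a)).map (fun a => (pvAncEnc vs s).getD a 0) =
    (PySem.List.sorted
      ((PySem.List.pyRange 0 (PySem.Str.len c + 1)).foldl
        (fun acc k =>
          if (pvOcc vs).contains (PySem.Str.slice c none (some k))
          then acc ++ (pvOcc vs).getD (PySem.Str.slice c none (some k)) []
          else acc) [])
      (fun x => x)).map
      (fun i => (pvAncEnc vs s).getD (PySem.List.pyGetD vs i "") 0) := by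
  have hlen : PySem.Str.len c = (c.toList.length : Int) := PySem.Str.len_eq c
  set A := pvAncEnc vs s with hAdef
  -- the position list in flatMap form
  have hpos : (PySem.List.pyRange 0 (PySem.Str.len c + 1)).foldl
      (fun acc k =>
        if (pvOcc vs).contains (PySem.Str.slice c none (some k))
        then acc ++ (pvOcc vs).getD (PySem.Str.slice c none (some k)) []
        else acc) [] =
      (PySem.List.pyRange 0 (PySem.Str.len c + 1)).flatMap
        (fun k =>
          if (pvOcc vs).contains (PySem.Str.slice c none (some k))
          then (pvOcc vs).getD (PySem.Str.slice c none (some k)) []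
          else []) := by
    rw [PySem.List.foldl_congr_mem _ _
      (fun acc k => acc ++
        (if (pvOcc vs).contains (PySem.Str.slice c none (some k))
         then (pvOcc vs).getD (PySem.Str.slice c none (some k)) [] else [])) []
      (by
        intro acc k _
        by_cases h : (pvOcc vs).contains (PySem.Str.slice c none (some k)) = true <;>
          simp [h])]
    rw [PySem.List.foldl_append_eq_flatMap]
    simp
  -- slice length facts at admissible k
  have hsl : ∀ k : Int, 0 ≤ k → k < PySem.Str.len c + 1 →
      (PySem.Str.slice c none (some k)).toList = c.toList.take k.toNat ∧
      (c.toList.take k.toNat).length = k.toNat := by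
    intro k hk0 hk1
    refine ⟨pv_slice_toList c k hk0, ?_⟩
    rw [List.length_take]
    omega
  -- A's index list: strictly increasing, hence Nodup
  have hpwA : (((PySem.List.enumerate vs 0).filter (fun p => PySem.Str.startswith c p.2)).map
      (fun p => p.1)).Pairwise (fun x y => x < y) := by
    apply List.pairwise_map.mpr
    exact (PySem.List.pairwise_lt_enumerate vs 0).filter _
  have hndA : (((PySem.List.enumerate vs 0).filter (fun p => PySem.Str.startswith c p.2)).map
      (fun p => p.1)).Nodup := hpwA.imp (fun h => ne_of_lt h)
  -- the position list is Nodup: blocks are Nodup and pairwise disjoint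
  have hndP : ((PySem.List.pyRange 0 (PySem.Str.len c + 1)).flatMap
      (fun k =>
        if (pvOcc vs).contains (PySem.Str.slice c none (some k))
        then (pvOcc vs).getD (PySem.Str.slice c none (some k)) []
        else [])).Nodup := by
    apply List.nodup_flatMap.mpr
    constructor
    · intro k _
      split
      · exact pv_nodup_occ vs _
      · exact List.nodup_nil
    · have hkpw : (PySem.List.pyRange 0 (PySem.Str.len c + 1)).Pairwise (fun x y => x < y) := by
        rw [PySem.List.pyRange_of_pos 0 _ (by norm_num)]
        apply List.pairwise_map.mpr
        exact List.pairwise_lt_range.imp (fun h => by omega)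
      refine hkpw.imp_of_mem ?_
      intro k1 k2 hm1 hm2 hklt
      have hb1 := PySem.List.mem_pyRange_one.mp hm1
      have hb2 := PySem.List.mem_pyRange_one.mp hm2
      intro x hx1 hx2
      beta_reduce at hx1 hx2
      by_cases h1 : (pvOcc vs).contains (PySem.Str.slice c none (some k1)) = true
      · by_cases h2 : (pvOcc vs).contains (PySem.Str.slice c none (some k2)) = true
        · rw [if_pos h1] at hx1
          rw [if_pos h2] at hx2
          obtain ⟨j1, hj1, he1, hv1⟩ := (pv_mem_occ vs _ x).mp hx1
          obtain ⟨j2, hj2, he2, hv2⟩ := (pv_mem_occ vs _ x).mp hx2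
          have hj : j1 = j2 := by omega
          subst hj
          have hse : PySem.Str.slice c none (some k1) = PySem.Str.slice c none (some k2) :=
            he1.symm.trans he2
          have h1' := hsl k1 hb1.1 hb1.2
          have h2' := hsl k2 hb2.1 hb2.2
          have : k1.toNat = k2.toNat := by
            rw [← h1'.2, ← h2'.2, ← h1'.1, ← h2'.1, hse]
          omega
        · rw [if_neg h2] at hx2
          simp at hx2
      · rw [if_neg h1] at hx1
        simp at hx1
  -- same positions on both sides
  have hmem : ∀ x : Int,
      x ∈ (((PySem.List.enumerate vs 0).filter (fun p => PySem.Str.startswith c p.2)).map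
        (fun p => p.1)) ↔
      x ∈ ((PySem.List.pyRange 0 (PySem.Str.len c + 1)).flatMap
        (fun k =>
          if (pvOcc vs).contains (PySem.Str.slice c none (some k))
          then (pvOcc vs).getD (PySem.Str.slice c none (some k)) []
          else [])) := by
    intro x
    constructor
    · intro hx
      obtain ⟨p, hp, hpx⟩ := List.mem_map.mp hx
      have hp' := List.mem_filter.mp hp
      obtain ⟨j, hj, rfl⟩ := (PySem.List.mem_enumerate_iff vs 0 p).mp hp'.1
      have hpref : vs[j].toList <+: c.toList := by
        have h := hp'.2
        rw [PySem.Str.startswith_eq] at h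
        exact (PySem.Chars.startswith_iff _ _).mp h
      have hlle : vs[j].toList.length ≤ c.toList.length := hpref.length_le
      apply List.mem_flatMap.mpr
      refine ⟨(vs[j].toList.length : Int),
        PySem.List.mem_pyRange_one.mpr ⟨by positivity, by omega⟩, ?_⟩
      have hseq := pv_slice_eq c vs[j] hpref
      rw [hseq, if_pos ((pv_occ_contains vs _).mpr (List.getElem_mem hj))]
      exact (pv_mem_occ vs _ x).mpr ⟨j, hj, rfl, hpx.symm⟩
    · intro hx
      obtain ⟨k, hk, hkx⟩ := List.mem_flatMap.mp hx
      have hb := PySem.List.mem_pyRange_one.mp hk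
      by_cases hc : (pvOcc vs).contains (PySem.Str.slice c none (some k)) = true
      · rw [if_pos hc] at hkx
        obtain ⟨j, hj, he, rfl⟩ := (pv_mem_occ vs _ x).mp hkx
        apply List.mem_map.mpr
        refine ⟨((0 : Int) + (j : Int), vs[j]), List.mem_filter.mpr ⟨?_, ?_⟩, rfl⟩
        · exact (PySem.List.mem_enumerate_iff vs 0 _).mpr ⟨j, hj, rfl⟩
        · rw [PySem.Str.startswith_eq]
          apply (PySem.Chars.startswith_iff _ _).mpr
          rw [he, (hsl k hb.1 hb.2).1]
          exact List.take_prefix _ _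
      · rw [if_neg hc] at hkx
        simp at hkx
  have hperm : (((PySem.List.enumerate vs 0).filter (fun p => PySem.Str.startswith c p.2)).map
      (fun p => p.1)).Perm
      ((PySem.List.pyRange 0 (PySem.Str.len c + 1)).flatMap
        (fun k =>
          if (pvOcc vs).contains (PySem.Str.slice c none (some k))
          then (pvOcc vs).getD (PySem.Str.slice c none (some k)) []
          else [])) :=
    (List.perm_ext_iff_of_nodup hndA hndP).mpr hmem
  rw [hpos,
    PySem.List.sorted_eq_of_perm_of_pairwise_lt _ _ (fun x => x) hperm hpwA]
  -- both sides are now a map over A's filtered enumeration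
  conv_lhs => rw [← PySem.List.map_snd_enumerate vs 0]
  rw [List.filter_map, List.map_map, List.map_map]
  apply List.map_congr_left
  intro p hp
  have hpe : p ∈ PySem.List.enumerate vs 0 := List.mem_of_mem_filter hp
  rw [PySem.List.mem_enumerate_iff] at hpe
  obtain ⟨j, hj, rfl⟩ := hpe
  simp only [Function.comp]
  rw [zero_add, PySem.List.pyGetD_natCast, List.getD_eq_getElem vs "" hj]

-- ===== VERDICT (by name: the statement is the Claim_ definition above) =====
theorem encode_classes_and_ancestors_spec : Claim_equal_encode_classes_and_ancestors := by
  intro leaf_paths intermediate_paths _hdom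
  unfold Spec_encode_classes_and_ancestors
  unfold encode_classes_and_ancestors encode_classes_and_ancestors_alt
  show pvBuild _ _ _ = pvBuild _ _ _
  exact congrArg (pvBuild _ _) (funext (fun c => pv_inner_eq _ _ c))
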